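-- pv_equiv track=rewrite | github.com/linda-techy/yt-automation-vps | services/retention_optimizer.py | optimize_hook_placement
-- ===== SOURCE A (Python) =====
-- def optimize_hook_placement(script_sections):
--     """
--     Reorders script sections to ensure strongest hook is first.
--
--     Args:
--         script_sections: List of script section dicts
--
--     Returns:
--         Reordered list with best hook first
--     """
--     # Hook indicators (questions, shocking statements, bold claims)
--     hook_keywords = [
--         "?", "shocking", "revealed", "secret", "never", "don't know",
--         "ഞെട്ടിക്കുന്ന", "രഹസ്യം", "അറിയാതെ"  # Malayalam hook words
--     ]
--
--     # Score each section for hook potential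
--     scored_sections = []
--     for i, section in enumerate(script_sections):
--         content = section.get('content', '').lower()
--         title = section.get('title', '').lower()
--         score = 0
--
--         # Check for hook keywords
--         for keyword in hook_keywords:
--             if keyword in content or keyword in title:
--                 score += 1
--
--         # First section bonus (usually designed as hook)
--         if i == 0:
--             score += 2
--
--         scored_sections.append((score, section))
--
--     # Sort by score (descending)
--     scored_sections.sort(key=lambda x: x[0], reverse=True)
--
--     # Return reordered (but in practice, we usually keep original order if hook is already first)
--     return [s[1] for s in scored_sections]
-- ===== SOURCE B (Python) =====
-- def optimize_hook_placement(script_sections):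
--     """Counting-sort rewrite: scores are bounded (9 keywords + 2 bonus), so
--     bucket sections by score and emit buckets from high score to low."""
--     hook_keywords = [
--         "?", "shocking", "revealed", "secret", "never", "don't know",
--         "\u0d1e\u0d46\u0d1f\u0d4d\u0d1f\u0d3f\u0d15\u0d4d\u0d15\u0d41\u0d28\u0d4d\u0d28",
--         "\u0d30\u0d39\u0d38\u0d4d\u0d2f\u0d02",
--         "\u0d05\u0d31\u0d3f\u0d2f\u0d3e\u0d24\u0d46",
--     ]
--     max_score = len(hook_keywords) + 2  # 11
--     buckets = [[] for _ in range(max_score + 1)]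
--     for i, section in enumerate(script_sections):
--         content = section.get('content', '').lower()
--         title = section.get('title', '').lower()
--         score = sum(1 for kw in hook_keywords if kw in content or kw in title)
--         if i == 0:
--             score += 2
--         buckets[score].append(section)
--     result = []
--     for bucket in reversed(buckets):
--         result.extend(bucket)
--     return result
-- ===== Notes on version B (the rewrite author's own statement) =====
-- stated objective: alternative
-- what changed: Replaces the stable reverse comparison sort of scored sections by a single-pass counting sort: scores are bounded by 11 (9 keywords + 2 first-section bonus), so sections are appended to per-score buckets in original order and the buckets are emitted from highest score to lowest, which reproduces Python's stable descending sort exactly.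
import Mathlib
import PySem

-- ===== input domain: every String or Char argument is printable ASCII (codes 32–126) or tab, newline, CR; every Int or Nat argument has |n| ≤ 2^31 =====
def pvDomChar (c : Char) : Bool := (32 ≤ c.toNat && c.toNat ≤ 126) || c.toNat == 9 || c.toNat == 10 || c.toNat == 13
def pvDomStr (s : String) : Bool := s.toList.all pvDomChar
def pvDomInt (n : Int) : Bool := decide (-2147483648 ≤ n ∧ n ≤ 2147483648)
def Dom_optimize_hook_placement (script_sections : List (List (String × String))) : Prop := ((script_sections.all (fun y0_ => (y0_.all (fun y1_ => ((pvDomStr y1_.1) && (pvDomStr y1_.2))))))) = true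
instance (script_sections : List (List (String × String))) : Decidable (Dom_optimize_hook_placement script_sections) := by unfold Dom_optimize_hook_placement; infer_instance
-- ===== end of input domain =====

-- B replaces the stable reverse sort by a counting sort over the bounded score range (≤ 11); equivalence of return values is proved on the whole domain.


-- the fixed keyword list shared by both Pythons
def pvKeywords : List String :=
  ["?", "shocking", "revealed", "secret", "never", "don't know",
   "ഞെട്ടിക്കുന്ന", "രഹസ്യം", "അറിയാതെ"]

-- ===== PORT A =====
def optimize_hook_placement (script_sections : List (List (String × String))) : List (List (String × String)) :=
  let hook_keywords := pvKeywords
  -- for i, section in enumerate(...): build scored_sections by appending (score, section)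
  let scored_sections :=
    (PySem.List.enumerate script_sections).foldl
      (fun acc p =>
        let content := PySem.Str.lower ((PySem.Dict.mk p.2).getD "content" "")
        let title := PySem.Str.lower ((PySem.Dict.mk p.2).getD "title" "")
        let score : Int :=
          hook_keywords.foldl
            (fun s kw => if PySem.Str.isIn kw content || PySem.Str.isIn kw title then s + 1 else s) 0
        let score := if p.1 == 0 then score + 2 else score
        acc ++ [(score, p.2)]) []
  -- scored_sections.sort(key=lambda x: x[0], reverse=True)
  (PySem.List.sorted scored_sections (fun x => x.1) true).map (fun s => s.2)

-- ===== PORT B =====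
-- buckets[score].append(section)
def pvAppendAt {α : Type} : List (List α) → Nat → α → List (List α)
  | [], _, _ => []
  | b :: bs, 0, x => (b ++ [x]) :: bs
  | b :: bs, n + 1, x => b :: pvAppendAt bs n x

-- the per-section score of Source B (count of matching keywords, +2 for index 0)
def pvScoreB (i : Int) (sec : List (String × String)) : Nat :=
  let content := PySem.Str.lower ((PySem.Dict.mk sec).getD "content" "")
  let title := PySem.Str.lower ((PySem.Dict.mk sec).getD "title" "")
  let score := pvKeywords.countP (fun kw => PySem.Str.isIn kw content || PySem.Str.isIn kw title)
  if i == 0 then score + 2 else score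

def optimize_hook_placement_alt (script_sections : List (List (String × String))) : List (List (String × String)) :=
  let buckets := List.replicate (pvKeywords.length + 2 + 1) ([] : List (List (String × String)))
  let buckets :=
    (PySem.List.enumerate script_sections).foldl
      (fun bs p => pvAppendAt bs (pvScoreB p.1 p.2) p.2) buckets
  buckets.reverse.foldl (fun r b => r ++ b) []

-- ===== PRECONDITION & SPEC =====
def Spec_optimize_hook_placement (script_sections : List (List (String × String))) (out : List (List (String × String))) : Prop := out = optimize_hook_placement_alt script_sections
instance (script_sections : List (List (String × String))) (out : List (List (String × String))) : Decidable (Spec_optimize_hook_placement script_sections out) := by unfold Spec_optimize_hook_placement; infer_instance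

-- ===== CLAIM (what is proved, stated in full; the proofs are below) =====
def Claim_equal_optimize_hook_placement : Prop := ∀ (script_sections : List (List (String × String))), Dom_optimize_hook_placement script_sections → Spec_optimize_hook_placement script_sections (optimize_hook_placement script_sections)

-- ===== LEMMAS AND PROOFS =====

-- bucket concatenation of the pairs ps along the key values ks
def pvBC (ps : List (Int × List (String × String))) (ks : List Int) : List (Int × List (String × String)) :=
  ks.flatMap (fun k => ps.filter (fun p => p.1 == k))

-- insertBy passes a block it does not go before
theorem pv_insertBy_append_not {α : Type} (before : α → α → Bool) (x : α) (bl rest : List α)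
    (h : ∀ y ∈ bl, before x y = false) :
    PySem.List.insertBy before x (bl ++ rest) = bl ++ PySem.List.insertBy before x rest := by
  induction bl with
  | nil => simp
  | cons b bs ih =>
    have hb : before x b = false := h b (by simp)
    simp [PySem.List.insertBy, hb]
    exact ih (fun y hy => h y (by simp [hy]))

theorem pv_insertBy_all_true {α : Type} (before : α → α → Bool) (x : α) (l : List α)
    (h : ∀ y ∈ l, before x y = true) :
    PySem.List.insertBy before x l = x :: l := by
  cases l with
  | nil => simp [PySem.List.insertBy]
  | cons y ys => simp [PySem.List.insertBy, h y (by simp)]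

theorem pv_mem_pvBC (ps : List (Int × List (String × String))) (ks : List Int)
    (y : Int × List (String × String)) (hy : y ∈ pvBC ps ks) : y.1 ∈ ks := by
  unfold pvBC at hy
  simp only [List.mem_flatMap, List.mem_filter] at hy
  obtain ⟨k, hk, _, he⟩ := hy
  have : y.1 = k := by simpa [beq_iff_eq] using he
  exact this ▸ hk

theorem pv_pvBC_append_not_mem (ps : List (Int × List (String × String))) (ks : List Int)
    (x : Int × List (String × String)) (hx : x.1 ∉ ks) :
    pvBC (ps ++ [x]) ks = pvBC ps ks := by
  unfold pvBC
  refine List.flatMap_congr ?_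
  intro k hk
  rw [List.filter_append]
  have hne : ¬ x.1 = k := fun he => hx (he ▸ hk)
  have : (List.filter (fun p => p.1 == k) [x]) = [] := by
    simp [hne]
  simp [this]

theorem pv_ins_pvBC (ks : List Int) (hks : ks.Pairwise (· > ·))
    (x : Int × List (String × String)) (hx : x.1 ∈ ks)
    (pref : List (Int × List (String × String))) :
    PySem.List.insertBy (fun a b => decide (b.1 < a.1)) x (pvBC pref ks)
      = pvBC (pref ++ [x]) ks := by
  induction ks generalizing pref with
  | nil => cases hx
  | cons k ks' ih =>
    have hgt : ∀ b ∈ ks', k > b := (List.pairwise_cons.mp hks).1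
    have htail : ks'.Pairwise (· > ·) := (List.pairwise_cons.mp hks).2
    have hbc : pvBC pref (k :: ks') = pref.filter (fun p => p.1 == k) ++ pvBC pref ks' := by
      simp [pvBC]
    by_cases hxk : x.1 = k
    · have hblk : ∀ y ∈ pref.filter (fun p => p.1 == k), (decide (y.1 < x.1)) = false := by
        intro y hy
        have : y.1 = k := by simpa [beq_iff_eq] using (List.mem_filter.mp hy).2
        simp [this, hxk]
      have hrest : ∀ y ∈ pvBC pref ks', (decide (y.1 < x.1)) = true := by
        intro y hy
        have hk' : y.1 ∈ ks' := pv_mem_pvBC _ _ _ hy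
        have : y.1 < k := hgt _ hk'
        simp [hxk, this]
      rw [hbc, pv_insertBy_append_not _ _ _ _ hblk, pv_insertBy_all_true _ _ _ hrest]
      have hnot : x.1 ∉ ks' := by
        intro hmem
        exact absurd (hgt _ hmem) (by simp [hxk])
      rw [show pvBC (pref ++ [x]) (k :: ks')
            = (pref ++ [x]).filter (fun p => p.1 == k) ++ pvBC (pref ++ [x]) ks' by simp [pvBC]]
      rw [pv_pvBC_append_not_mem _ _ _ hnot, List.filter_append]
      simp [hxk]
    · have hx' : x.1 ∈ ks' := by
        rcases List.mem_cons.mp hx with h | h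
        · exact absurd h hxk
        · exact h
      have hlt : x.1 < k := hgt _ hx'
      have hblk : ∀ y ∈ pref.filter (fun p => p.1 == k), (decide (y.1 < x.1)) = false := by
        intro y hy
        have : y.1 = k := by simpa [beq_iff_eq] using (List.mem_filter.mp hy).2
        simp [this]; omega
      rw [hbc, pv_insertBy_append_not _ _ _ _ hblk, ih htail hx']
      rw [show pvBC (pref ++ [x]) (k :: ks')
            = (pref ++ [x]).filter (fun p => p.1 == k) ++ pvBC (pref ++ [x]) ks' by simp [pvBC]]
      rw [List.filter_append]
      have : (List.filter (fun p => p.1 == k) [x]) = [] := by simp [hxk]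
      simp [this]

theorem pv_foldl_ins (ks : List Int) (hks : ks.Pairwise (· > ·))
    (l : List (Int × List (String × String))) (hl : ∀ x ∈ l, x.1 ∈ ks)
    (pref : List (Int × List (String × String))) :
    l.foldl (fun acc x => PySem.List.insertBy (fun a b => decide (b.1 < a.1)) x acc) (pvBC pref ks)
      = pvBC (pref ++ l) ks := by
  induction l generalizing pref with
  | nil => simp
  | cons x xs ih =>
    simp only [List.foldl_cons]
    rw [pv_ins_pvBC ks hks x (hl x (by simp)) pref]
    rw [ih (fun y hy => hl y (by simp [hy])) (pref ++ [x])]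
    simp

-- sorted(xs, key=fst, reverse=True) is the bucket concatenation along descending keys
theorem pv_sorted_rev_eq_pvBC (ks : List Int) (hks : ks.Pairwise (· > ·))
    (l : List (Int × List (String × String))) (hl : ∀ x ∈ l, x.1 ∈ ks) :
    PySem.List.sorted l (fun x => x.1) true = pvBC l ks := by
  rw [PySem.List.sorted_rev_eq_foldl_insertBy]
  have h0 : pvBC [] ks = [] := by simp [pvBC]
  have := pv_foldl_ins ks hks l hl []
  rw [h0] at this
  simpa using this

-- pvAppendAt characterized through getElem?
theorem pv_appendAt_getElem? {α : Type} (bs : List (List α)) (s : Nat) (x : α) (j : Nat) :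
    (pvAppendAt bs s x)[j]? = (bs[j]?).map (fun b => if j = s then b ++ [x] else b) := by
  induction bs generalizing s j with
  | nil => simp [pvAppendAt]
  | cons b bs ih =>
    cases s with
    | zero =>
      cases j with
      | zero => simp [pvAppendAt]
      | succ j => simp [pvAppendAt]
    | succ s =>
      cases j with
      | zero => simp [pvAppendAt]
      | succ j => simpa [pvAppendAt, Nat.succ_inj] using ih s j

-- the bucket-building fold characterized through getElem?
theorem pv_fold_getElem? (ps : List (Int × List (String × String)))
    (bs : List (List (List (String × String)))) (j : Nat) :
    (ps.foldl (fun bs p => pvAppendAt bs (pvScoreB p.1 p.2) p.2) bs)[j]?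
      = (bs[j]?).map (fun b => b ++ (ps.filter (fun p => pvScoreB p.1 p.2 == j)).map Prod.snd) := by
  induction ps generalizing bs with
  | nil => cases h : bs[j]? <;> simp [h]
  | cons p ps ih =>
    simp only [List.foldl_cons]
    rw [ih, pv_appendAt_getElem?]
    cases bs[j]? with
    | none => simp
    | some b =>
      simp only [Option.map_some]
      by_cases hj : j = pvScoreB p.1 p.2
      · have hb : (pvScoreB p.1 p.2 == j) = true := by simp [hj]
        simp [hj]
      · have hb : (pvScoreB p.1 p.2 == j) = false := by
          exact beq_eq_false_iff_ne.mpr (fun he => hj he.symm)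
        simp [hj, hb]

theorem pv_scoreB_le (i : Int) (sec : List (String × String)) : pvScoreB i sec ≤ 11 := by
  have h : ∀ (c t : String),
      List.countP (fun kw => PySem.Str.isIn kw c || PySem.Str.isIn kw t) pvKeywords ≤ 9 :=
    fun c t => by
      have h1 := List.countP_le_length
        (p := fun kw => PySem.Str.isIn kw c || PySem.Str.isIn kw t) (l := pvKeywords)
      have h2 : pvKeywords.length = 9 := rfl
      omega
  simp only [pvScoreB]
  split
  · have := h (PySem.Str.lower ((PySem.Dict.mk sec).getD "content" ""))
      (PySem.Str.lower ((PySem.Dict.mk sec).getD "title" ""))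
    omega
  · have := h (PySem.Str.lower ((PySem.Dict.mk sec).getD "content" ""))
      (PySem.Str.lower ((PySem.Dict.mk sec).getD "title" ""))
    omega

-- the descending key values the scores can take
def pvKs : List Int := ((List.range 12).reverse).map (fun j => Int.ofNat j)

-- the score expression of port A, named for the proofs
def pvScoreA (p : Int × List (String × String)) : Int :=
  let content := PySem.Str.lower ((PySem.Dict.mk p.2).getD "content" "")
  let title := PySem.Str.lower ((PySem.Dict.mk p.2).getD "title" "")
  let score : Int :=
    pvKeywords.foldl
      (fun s kw => if PySem.Str.isIn kw content || PySem.Str.isIn kw title then s + 1 else s) 0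
  if p.1 == 0 then score + 2 else score

theorem pv_scoreA_eq (p : Int × List (String × String)) :
    pvScoreA p = ((pvScoreB p.1 p.2 : Nat) : Int) := by
  unfold pvScoreA
  simp only [pvScoreB, PySem.List.foldl_count_if]
  split <;> push_cast <;> ring

theorem pv_A_char (ss : List (List (String × String))) :
    optimize_hook_placement ss
      = (PySem.List.sorted
          ((PySem.List.enumerate ss).map (fun p => (((pvScoreB p.1 p.2 : Nat) : Int), p.2)))
          (fun x => x.1) true).map (fun s => s.2) := by
  have h1 : (PySem.List.enumerate ss).foldl (fun acc p => acc ++ [(pvScoreA p, p.2)]) []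
      = (PySem.List.enumerate ss).map (fun p => (((pvScoreB p.1 p.2 : Nat) : Int), p.2)) := by
    rw [PySem.List.foldl_append_singleton_eq_map, List.nil_append]
    exact List.map_congr_left (fun a _ => by rw [pv_scoreA_eq a])
  show (PySem.List.sorted
      ((PySem.List.enumerate ss).foldl (fun acc p => acc ++ [(pvScoreA p, p.2)]) [])
      (fun x => x.1) true).map (fun s => s.2) = _
  rw [h1]

theorem pv_B_char (ss : List (List (String × String))) :
    optimize_hook_placement_alt ss
      = ((List.range 12).reverse).flatMap
          (fun j => ((PySem.List.enumerate ss).filter (fun p => pvScoreB p.1 p.2 == j)).map Prod.snd) := by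
  have hb : (PySem.List.enumerate ss).foldl
        (fun bs p => pvAppendAt bs (pvScoreB p.1 p.2) p.2)
        (List.replicate (pvKeywords.length + 2 + 1) [])
      = (List.range 12).map
          (fun j => ((PySem.List.enumerate ss).filter (fun p => pvScoreB p.1 p.2 == j)).map Prod.snd) := by
    apply List.ext_getElem?
    intro j
    rw [pv_fold_getElem?]
    have hrep : (pvKeywords.length + 2 + 1) = 12 := rfl
    rw [hrep, List.getElem?_replicate, List.getElem?_map]
    by_cases hj : j < 12
    · rw [List.getElem?_range hj]
      simp [hj]
    · have hnone : (List.range 12)[j]? = none := by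
        rw [List.getElem?_eq_none_iff]
        simpa [List.length_range] using Nat.le_of_not_lt hj
      rw [hnone]
      simp [hj]
  show ((PySem.List.enumerate ss).foldl
      (fun bs p => pvAppendAt bs (pvScoreB p.1 p.2) p.2)
      (List.replicate (pvKeywords.length + 2 + 1) [])).reverse.foldl (fun r b => r ++ b) [] = _
  rw [hb, PySem.List.foldl_append_eq_flatMap (g := fun b => b), List.nil_append,
      ← List.map_reverse, List.flatMap_map]

theorem pv_cast_mem_ks (n : Nat) (h : n ≤ 11) : ((n : Int)) ∈ pvKs := by
  unfold pvKs
  refine List.mem_map.mpr ⟨n, ?_, rfl⟩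
  rw [List.mem_reverse]
  exact List.mem_range.mpr (by omega)

theorem pv_buckets_eq (ps : List (Int × List (String × String))) (j : Nat) :
    (((ps.map (fun p => (((pvScoreB p.1 p.2 : Nat) : Int), p.2))).filter
        (fun p => p.1 == ((j : Nat) : Int))).map (fun s => s.2))
      = (ps.filter (fun p => pvScoreB p.1 p.2 == j)).map Prod.snd := by
  rw [List.filter_map, List.map_map]
  have hpred : ((fun p : Int × List (String × String) => p.1 == ((j : Nat) : Int))
      ∘ (fun p : Int × List (String × String) => (((pvScoreB p.1 p.2 : Nat) : Int), p.2)))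
      = fun p => pvScoreB p.1 p.2 == j := by
    funext p
    by_cases h : pvScoreB p.1 p.2 = j <;> simp [h]
  rw [hpred]
  rfl

-- ===== VERDICT (by name: the statement is the Claim_ definition above) =====
theorem optimize_hook_placement_spec : Claim_equal_optimize_hook_placement := by
  intro ss _
  unfold Spec_optimize_hook_placement
  rw [pv_A_char, pv_B_char]
  have hks : pvKs.Pairwise (· > ·) := by decide
  have hl : ∀ x ∈ (PySem.List.enumerate ss).map
      (fun p => (((pvScoreB p.1 p.2 : Nat) : Int), p.2)), x.1 ∈ pvKs := by
    intro x hx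
    obtain ⟨p, hp, rfl⟩ := List.mem_map.mp hx
    exact pv_cast_mem_ks _ (pv_scoreB_le _ _)
  rw [pv_sorted_rev_eq_pvBC pvKs hks _ hl]
  unfold pvBC
  rw [List.map_flatMap]
  unfold pvKs
  rw [List.flatMap_map]
  refine List.flatMap_congr ?_
  intro j _
  exact pv_buckets_eq (PySem.List.enumerate ss) j
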